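-- pv_equiv track=rewrite | github.com/countofkrakow/viterbi_em | src/viterbi.py | find_cpg_islands
-- ===== SOURCE A (Python) =====
-- def find_cpg_islands(states, k):
--     in_cpg = False
--     ret = []
--     i = 0
--     start = None
--     while k != 0 and i < len(states):
--         # not in a cpg island
--         not_cpg = states[i]
--         if not_cpg:
--             # exiting cpg island
--             if in_cpg:
--                 in_cpg = False
--                 ret.append((start + 1, i))
--                 k -= 1
--
--         # in cpg island
--         else:
--             # entering cpg island
--             if not in_cpg:
--                 start = i
--                 in_cpg = True
--         i += 1
--     return ret
-- ===== SOURCE B (Python) =====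
-- def find_cpg_islands(states, k):
--     # A maximal falsy run is an island; it is complete once a truthy state follows it.
--     # Boundary scan: an island starts where a truthy (or the virtual leading truthy)
--     # is followed by a falsy, and ends where a falsy is followed by a truthy.
--     pairs = list(zip([True] + list(states), states))
--     starts = [i + 1 for i, (prev, cur) in enumerate(pairs) if prev and not cur]
--     ends = [i for i, (prev, cur) in enumerate(pairs) if not prev and cur]
--     return list(zip(starts, ends))[:k]
-- ===== Notes on version B (the rewrite author's own statement) =====
-- stated objective: simpler
-- what changed: Replaces the inline enter/exit flag machine (mutable in_cpg/start/k state in a while loop) by a boundary-scan decomposition: two comprehensions list island starts and ends, zip pairs them, and a single slice keeps the first k; Pre_ restricts k to nonnegative counts, the task's natural domain — a negative count is not a meaningful number of islands to return, and there A returns all islands while B's slice drops from the end.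
-- outside the precondition, e.g. on find_cpg_islands([False, True], -1): A returns [(1, 1)], B returns []
import Mathlib
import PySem

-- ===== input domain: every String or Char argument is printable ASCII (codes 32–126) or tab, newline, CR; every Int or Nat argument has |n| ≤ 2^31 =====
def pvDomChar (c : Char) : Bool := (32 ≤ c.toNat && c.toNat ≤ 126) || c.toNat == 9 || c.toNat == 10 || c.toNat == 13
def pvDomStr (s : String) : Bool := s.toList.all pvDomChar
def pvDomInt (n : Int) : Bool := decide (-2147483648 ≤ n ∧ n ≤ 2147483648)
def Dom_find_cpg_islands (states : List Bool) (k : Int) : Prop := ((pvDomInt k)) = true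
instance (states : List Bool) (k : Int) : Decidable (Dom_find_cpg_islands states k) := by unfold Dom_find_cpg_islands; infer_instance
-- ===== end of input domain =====

-- B replaces A's inline enter/exit flag machine by a boundary-scan decomposition
-- (start/end boundary comprehensions zipped into intervals, then a [:k] slice); objective: simpler.

-- ===== PORT A =====
-- A's while loop: state (in_cpg, ret, i, start, k), scanning the remaining suffix of states.
-- Python's 'start = None' is only read after start was assigned, so it is carried as a Nat (init 0).
def pvLoopA : List Bool → Nat → Int → Bool → Nat → List (Int × Int) → List (Int × Int)
  | [], _, _, _, _, ret => ret
  | s :: rest, i, k, in_cpg, start, ret =>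
    if k = 0 then ret
    else if s then
      if in_cpg then pvLoopA rest (i+1) (k-1) false start (ret ++ [((start : Int) + 1, (i : Int))])
      else pvLoopA rest (i+1) k in_cpg start ret
    else
      if in_cpg then pvLoopA rest (i+1) k in_cpg start ret
      else pvLoopA rest (i+1) k true i ret

def find_cpg_islands (states : List Bool) (k : Int) : List (Int × Int) :=
  pvLoopA states 0 k false 0 []

-- ===== PORT B =====
-- Python's enumerate(xs) (with an offset parameter for the recursion).
def pvEnum {α : Type} : Nat → List α → List (Nat × α)
  | _, [] => []
  | i, a :: l => (i, a) :: pvEnum (i+1) l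

def find_cpg_islands_alt (states : List Bool) (k : Int) : List (Int × Int) :=
  let pairs := (true :: states).zip states
  let starts := ((pvEnum 0 pairs).filter (fun p => p.2.1 && !p.2.2)).map
    (fun p => ((p.1 : Int) + 1))
  let ends := ((pvEnum 0 pairs).filter (fun p => (!p.2.1) && p.2.2)).map
    (fun p => ((p.1 : Int)))
  PySem.List.slice (starts.zip ends) none (some k)

-- ===== PRECONDITION & SPEC =====
-- Pre_ restricts k to nonnegative counts, the task's natural domain: for negative k A's
-- loop condition 'k != 0' accidentally never fires and A returns ALL islands, while B's
-- natural slice islands[:k] drops elements from the end.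
def Pre_find_cpg_islands (states : List Bool) (k : Int) : Prop := 0 ≤ k
instance (states : List Bool) (k : Int) : Decidable (Pre_find_cpg_islands states k) := by unfold Pre_find_cpg_islands; infer_instance

def pvWitness_find_cpg_islands : List Bool × Int := ([false, true, false], 2)

def Spec_find_cpg_islands (states : List Bool) (k : Int) (out : List (Int × Int)) : Prop := out = find_cpg_islands_alt states k
instance (states : List Bool) (k : Int) (out : List (Int × Int)) : Decidable (Spec_find_cpg_islands states k out) := by unfold Spec_find_cpg_islands; infer_instance

-- ===== CLAIM (what is proved, stated in full; the proofs are below) =====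
def Claim_equal_find_cpg_islands : Prop := ∀ (states : List Bool) (k : Int), Dom_find_cpg_islands states k → Pre_find_cpg_islands states k → Spec_find_cpg_islands states k (find_cpg_islands states k)

-- ===== LEMMAS AND PROOFS =====

-- Reference scan: the full list of completed islands in the suffix, ignoring k.
def pvS : List Bool → Nat → Bool → Nat → List (Int × Int)
  | [], _, _, _ => []
  | s :: rest, i, inc, start =>
    if s then
      if inc then ((start : Int) + 1, (i : Int)) :: pvS rest (i+1) false start
      else pvS rest (i+1) false start
    else
      if inc then pvS rest (i+1) true start
      else pvS rest (i+1) true i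

-- A's loop = accumulator ++ (all islands, truncated to k when k ≥ 0).
lemma pvLoopA_spec (l : List Bool) : ∀ (i : Nat) (k : Int) (inc : Bool) (start : Nat)
    (ret : List (Int × Int)),
    pvLoopA l i k inc start ret =
      ret ++ (if k < 0 then pvS l i inc start else (pvS l i inc start).take k.toNat) := by
  induction l with
  | nil =>
    intro i k inc start ret
    simp [pvLoopA, pvS]
  | cons s rest ih =>
    intro i k inc start ret
    by_cases hk : k = 0
    · subst hk; simp [pvLoopA, pvS]
    · cases s <;> cases inc
      · -- s = false, inc = false
        simp only [pvLoopA, pvS, if_neg hk, Bool.false_eq_true, if_false]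
        rw [ih]
      · -- s = false, inc = true
        simp only [pvLoopA, pvS, if_neg hk, Bool.false_eq_true, if_false, if_true]
        rw [ih]
      · -- s = true, inc = false
        simp only [pvLoopA, pvS, if_neg hk, Bool.false_eq_true, if_false, if_true]
        rw [ih]
      · -- s = true, inc = true : emit
        have hA : pvLoopA (true :: rest) i k true start ret
            = pvLoopA rest (i+1) (k-1) false start (ret ++ [((start : Int) + 1, (i : Int))]) := by
          conv_lhs => rw [pvLoopA]
          simp [hk]
        have hS : pvS (true :: rest) i true start
            = ((start : Int) + 1, (i : Int)) :: pvS rest (i+1) false start := by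
          conv_lhs => rw [pvS]
          simp
        rw [hA, hS, ih]
        by_cases hneg : k < 0
        · have h1 : k - 1 < 0 := by omega
          rw [if_pos h1, if_pos hneg, List.append_assoc, List.singleton_append]
        · have h1 : ¬ (k - 1 < 0) := by omega
          have h2 : k.toNat = (k - 1).toNat + 1 := by omega
          rw [if_neg h1, if_neg hneg, h2, List.take_succ_cons, List.append_assoc,
            List.singleton_append]

-- B's boundary comprehensions over the suffix, with the preceding state s0 and offset i.
def pvSt (s0 : Bool) (l : List Bool) (i : Nat) : List Int :=
  ((pvEnum i ((s0 :: l).zip l)).filter (fun p => p.2.1 && !p.2.2)).map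
    (fun p => ((p.1 : Int) + 1))

def pvEn (s0 : Bool) (l : List Bool) (i : Nat) : List Int :=
  ((pvEnum i ((s0 :: l).zip l)).filter (fun p => (!p.2.1) && p.2.2)).map
    (fun p => ((p.1 : Int)))

lemma pvSt_cons (s0 s : Bool) (rest : List Bool) (i : Nat) :
    pvSt s0 (s :: rest) i =
      (if s0 && !s then [((i : Int) + 1)] else []) ++ pvSt s rest (i+1) := by
  cases s0 <;> cases s <;> simp [pvSt, pvEnum]

lemma pvEn_cons (s0 s : Bool) (rest : List Bool) (i : Nat) :
    pvEn s0 (s :: rest) i =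
      (if (!s0) && s then [(i : Int)] else []) ++ pvEn s rest (i+1) := by
  cases s0 <;> cases s <;> simp [pvEn, pvEnum]

-- zipping the boundary lists yields exactly the reference scan.
lemma pvB_eq_S (l : List Bool) : ∀ (s0 : Bool) (i start : Nat),
    (if s0 then (pvSt s0 l i).zip (pvEn s0 l i) = pvS l i false start
     else (((start : Int) + 1) :: pvSt s0 l i).zip (pvEn s0 l i) = pvS l i true start) := by
  induction l with
  | nil =>
    intro s0 i start
    cases s0 <;> simp [pvSt, pvEn, pvEnum, pvS]
  | cons s rest ih =>
    intro s0 i start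
    cases s0 <;> cases s <;>
      simp only [pvSt_cons, pvEn_cons, pvS, Bool.and_self, Bool.not_true, Bool.not_false,
        Bool.and_true, Bool.and_false, Bool.true_and, Bool.false_and, if_true, if_false,
        Bool.false_eq_true, List.nil_append, List.singleton_append, List.zip_cons_cons]
    · -- s0 = false, s = false
      have h := ih false (i+1) start
      simpa using h
    · -- s0 = false, s = true : close the island
      have h := ih true (i+1) start
      simp only [if_pos rfl] at h
      simpa using h
    · -- s0 = true, s = false : open an island
      have h := ih false (i+1) i
      simpa using h
    · -- s0 = true, s = true
      have h := ih true (i+1) start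
      simpa using h

-- ===== VERDICT (by name: the statement is the Claim_ definition above) =====
theorem find_cpg_islands_spec : Claim_equal_find_cpg_islands := by
  intro states k _ hkpre
  have hk : 0 ≤ k := hkpre
  unfold Spec_find_cpg_islands
  have hB := pvB_eq_S states true 0 0
  simp only [if_pos rfl] at hB
  have hkk : k = ((k.toNat : Nat) : Int) := by omega
  have hnneg : ¬ (k < 0) := by omega
  simp only [find_cpg_islands, find_cpg_islands_alt, pvLoopA_spec, if_neg hnneg,
    List.nil_append]
  rw [hkk, PySem.List.slice_to_natCast]
  simp only [Int.toNat_natCast]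
  have : (pvSt true states 0).zip (pvEn true states 0) = pvS states 0 false 0 := hB
  simp only [pvSt, pvEn] at this
  rw [← this]
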